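-- pv_equiv track=rewrite | github.com/dougmasten/crc32-6x09 | create-tables.py | build_table_256
-- ===== SOURCE A (Python) =====
-- def build_table_256(poly):
--     table = []
--     for i in range(256):
--         crc = i
--         for j in range(8):
--             if crc & 1:
--                 crc = (crc >> 1) ^ poly
--             else:
--                 crc >>= 1
--         table.append(crc)
--     return table
-- ===== SOURCE B (Python) =====
-- def build_table_256(poly):
--     # DP on GF(2)-linearity of the 8-round CRC step: entries for powers of two
--     # are computed with the 8-round loop; every other entry is the XOR of two
--     # already-computed smaller entries (clear lowest bit / lowest bit alone).
--     table = [0]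
--     for i in range(1, 256):
--         if i & (i - 1) == 0:
--             crc = i
--             for j in range(8):
--                 if crc & 1:
--                     crc = (crc >> 1) ^ poly
--                 else:
--                     crc >>= 1
--             table.append(crc)
--         else:
--             table.append(table[i & (i - 1)] ^ table[i & -i])
--     return table
-- ===== Notes on version B (the rewrite author's own statement) =====
-- stated objective: alternative
-- what changed: Instead of running the per-bit inner loop for every table index, B runs it only for the power-of-two indices and derives each remaining entry as the XOR of two already-computed smaller entries (clear-lowest-bit index and lowest-bit-only index), exploiting GF(2)-linearity of the CRC step; it does constant-factor less bit-loop work, though the fixed-size table makes that unmeasurable in a timing run.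
import Mathlib
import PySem

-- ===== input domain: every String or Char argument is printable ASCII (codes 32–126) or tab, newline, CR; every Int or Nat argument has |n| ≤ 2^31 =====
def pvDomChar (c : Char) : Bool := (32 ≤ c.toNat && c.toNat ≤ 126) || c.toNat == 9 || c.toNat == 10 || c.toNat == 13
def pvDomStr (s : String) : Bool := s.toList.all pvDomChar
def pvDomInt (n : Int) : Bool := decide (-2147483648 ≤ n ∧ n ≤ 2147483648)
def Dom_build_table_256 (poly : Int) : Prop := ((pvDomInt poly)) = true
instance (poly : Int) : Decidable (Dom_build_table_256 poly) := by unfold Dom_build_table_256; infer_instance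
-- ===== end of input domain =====

-- B computes only the power-of-two entries with the per-bit loop and derives every other
-- entry as the XOR of two earlier table entries (GF(2)-linearity of the CRC step); same
-- return value for every poly.

-- ===== PORT A =====
-- shared inner loop: 'crc = i; for j in range(8): crc = (crc>>1)^poly if crc&1 else crc>>1'
-- (identical text in A and in B's power-of-two branch)
def crc8_round (poly crc : Int) : Int :=
  if PySem.Int.band crc 1 ≠ 0 then PySem.Int.bxor (crc >>> (1:Nat)) poly else crc >>> (1:Nat)

def crc8 (poly crc : Int) : Int :=
  (PySem.List.pyRange 0 8).foldl (fun c _ => crc8_round poly c) crc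

def build_table_256 (poly : Int) : List Int :=
  (PySem.List.pyRange 0 256).foldl (fun table i => table ++ [crc8 poly i]) []

-- ===== PORT B =====
-- table[i & (i-1)] / table[i & -i]: the indices are provably in range (split_facts below),
-- so pyGetD with default 0 computes exactly Python's table[...] here.
def bstep (poly : Int) (table : List Int) (i : Int) : List Int :=
  if PySem.Int.band i (i - 1) = 0 then table ++ [crc8 poly i]
  else table ++ [PySem.Int.bxor (PySem.List.pyGetD table (PySem.Int.band i (i - 1)) 0)
                                (PySem.List.pyGetD table (PySem.Int.band i (-i)) 0)]

def build_table_256_alt (poly : Int) : List Int :=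
  (PySem.List.pyRange 1 256).foldl (bstep poly) [0]

-- ===== PRECONDITION & SPEC =====
def Spec_build_table_256 (poly : Int) (out : List Int) : Prop := out = build_table_256_alt poly
instance (poly : Int) (out : List Int) : Decidable (Spec_build_table_256 poly out) := by unfold Spec_build_table_256; infer_instance

-- ===== CLAIM (what is proved, stated in full; the proofs are below) =====
def Claim_equal_build_table_256 : Prop := ∀ (poly : Int), Dom_build_table_256 poly → Spec_build_table_256 poly (build_table_256 poly)

-- ===== LEMMAS AND PROOFS =====

-- evaluation of PySem.Int.bxor on the two Int constructors
theorem bxor_nsns (m n : Nat) : PySem.Int.bxor (Int.negSucc m) (Int.negSucc n) = ((m ^^^ n : Nat) : Int) := by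
  simp [PySem.Int.bxor, Int.negSucc_eq]; omega
theorem bxor_onns (m n : Nat) : PySem.Int.bxor ((m : Int)) (Int.negSucc n) = Int.negSucc (m ^^^ n) := by
  simp [PySem.Int.bxor, Int.negSucc_eq]; omega
theorem bxor_nson (m n : Nat) : PySem.Int.bxor (Int.negSucc m) ((n : Int)) = Int.negSucc (m ^^^ n) := by
  simp [PySem.Int.bxor, Int.negSucc_eq]; omega
theorem bxor_onon (m n : Nat) : PySem.Int.bxor ((m : Int)) ((n : Int)) = ((m ^^^ n : Nat) : Int) := by
  simp [PySem.Int.bxor]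

theorem natShift_xor (m n : Nat) : (m ^^^ n) >>> 1 = (m >>> 1) ^^^ (n >>> 1) :=
  Nat.eq_of_testBit_eq (by intro i; simp [Nat.testBit_shiftRight, Nat.testBit_xor])

theorem shift_on (m : Nat) : ((m : Int)) >>> (1:Nat) = ((m >>> 1 : Nat) : Int) := rfl
theorem shift_ns (m : Nat) : (Int.negSucc m) >>> (1:Nat) = Int.negSucc (m >>> 1) := rfl

-- >> 1 distributes over ^ (two's-complement arithmetic shift)
theorem bxor_shift (a b : Int) :
    (PySem.Int.bxor a b) >>> (1:Nat) = PySem.Int.bxor (a >>> (1:Nat)) (b >>> (1:Nat)) := by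
  cases a <;> cases b <;>
    simp only [Int.ofNat_eq_natCast, shift_on, shift_ns, bxor_onon, bxor_onns, bxor_nson,
      bxor_nsns, natShift_xor]

theorem bxor_assoc (a b c : Int) :
    PySem.Int.bxor (PySem.Int.bxor a b) c = PySem.Int.bxor a (PySem.Int.bxor b c) := by
  cases a <;> cases b <;> cases c <;>
    simp [bxor_onon, bxor_onns, bxor_nson, bxor_nsns, Nat.xor_assoc, Int.ofNat_eq_natCast]

theorem band1_on (m : Nat) : PySem.Int.band ((m : Int)) 1 = ((m % 2 : Nat) : Int) := by
  simp [PySem.Int.band, Nat.and_one_is_mod]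

theorem band1_ns (m : Nat) : PySem.Int.band (Int.negSucc m) 1 = ((1 - m % 2 : Nat) : Int) := by
  simp [PySem.Int.band, Int.negSucc_eq, Nat.and_one_is_mod]; omega

theorem xor_mod_two (m n : Nat) : (m ^^^ n) % 2 = (m % 2 + n % 2) % 2 := by
  rw [← Nat.and_one_is_mod, Nat.and_xor_distrib_right, Nat.and_one_is_mod, Nat.and_one_is_mod]
  rcases Nat.mod_two_eq_zero_or_one m with h | h <;>
    rcases Nat.mod_two_eq_zero_or_one n with h' | h' <;> simp [h, h']

-- parity of an xor
theorem band1_bxor (a b : Int) :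
    (PySem.Int.band (PySem.Int.bxor a b) 1 = 0) ↔
      ((PySem.Int.band a 1 = 0) ↔ (PySem.Int.band b 1 = 0)) := by
  cases a <;> cases b <;>
    simp [bxor_onon, bxor_onns, bxor_nson, bxor_nsns, band1_on, band1_ns, xor_mod_two,
      Int.ofNat_eq_natCast] <;> omega

theorem crcRound_eq (p c : Int) :
    crc8_round p c = PySem.Int.bxor (c >>> (1:Nat)) (if PySem.Int.band c 1 = 0 then 0 else p) := by
  unfold crc8_round
  split_ifs with h1 h2 <;> simp_all [PySem.Int.bxor_zero]

-- the CRC round is GF(2)-linear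
theorem round_lin (p a b : Int) :
    crc8_round p (PySem.Int.bxor a b) = PySem.Int.bxor (crc8_round p a) (crc8_round p b) := by
  rw [crcRound_eq, crcRound_eq, crcRound_eq, bxor_shift]
  have rearr : ∀ x y u v : Int, PySem.Int.bxor (PySem.Int.bxor x u) (PySem.Int.bxor y v)
      = PySem.Int.bxor (PySem.Int.bxor x y) (PySem.Int.bxor u v) := by
    intro x y u v
    rw [bxor_assoc, ← bxor_assoc u y v, PySem.Int.bxor_comm u y, bxor_assoc y u v, ← bxor_assoc]
  rw [rearr]
  congr 1
  by_cases ha : PySem.Int.band a 1 = 0 <;> by_cases hb : PySem.Int.band b 1 = 0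
  · rw [if_pos ((band1_bxor a b).2 (by simp [ha, hb]))]; simp [ha, hb, PySem.Int.bxor_zero]
  · rw [if_neg (by rw [band1_bxor]; simp [ha, hb])]; simp [ha, hb]
    rw [PySem.Int.bxor_comm 0 p, PySem.Int.bxor_zero]
  · rw [if_neg (by rw [band1_bxor]; simp [ha, hb])]; simp [ha, hb, PySem.Int.bxor_zero]
  · rw [if_pos ((band1_bxor a b).2 (by simp [ha, hb]))]; simp [ha, hb, PySem.Int.bxor_self]

theorem crcRound_zero (p : Int) : crc8_round p 0 = 0 := by
  unfold crc8_round
  norm_num [show PySem.Int.band 0 1 = 0 from by decide]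

theorem pyRange8 : PySem.List.pyRange 0 8 = [0,1,2,3,4,5,6,7] := by decide

theorem crc8_zero (p : Int) : crc8 p 0 = 0 := by
  simp only [crc8, pyRange8, List.foldl, crcRound_zero]

theorem crc8_lin (p a b : Int) :
    crc8 p (PySem.Int.bxor a b) = PySem.Int.bxor (crc8 p a) (crc8 p b) := by
  simp only [crc8, pyRange8, List.foldl, round_lin]

-- i = (i & (i-1)) ^ (i & -i) with both parts in [0, i) for 1 ≤ i < 256, i not a power of two
set_option maxRecDepth 10000 in
theorem split_facts : ∀ i ∈ PySem.List.pyRange 1 256, PySem.Int.band i (i-1) ≠ 0 →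
    (0 ≤ PySem.Int.band i (i-1) ∧ PySem.Int.band i (i-1) < i ∧
     0 ≤ PySem.Int.band i (-i) ∧ PySem.Int.band i (-i) < i ∧
     PySem.Int.bxor (PySem.Int.band i (i-1)) (PySem.Int.band i (-i)) = i) := by decide

-- reading an in-range index of the prefix table
theorem tbl_get (p : Int) (n : Nat) (a : Int) (h0 : 0 ≤ a) (h1 : a < (n : Int)) :
    PySem.List.pyGetD ((List.range n).map (fun k : Nat => crc8 p (k : Int))) a 0 = crc8 p a := by
  have hlen : ((List.range n).map (fun k : Nat => crc8 p (k : Int))).length = n := by simp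
  have hlt : a.toNat < n := by omega
  rw [PySem.List.pyGetD_eq_getElem _ 0 h0 (by rw [hlen]; exact_mod_cast h1)]
  simp only [List.getElem_map, List.getElem_range]
  rw [Int.toNat_of_nonneg h0]

-- loop invariant of B's fold: after processing 1..n-1 the table is [crc8 p 0, …, crc8 p (n-1)]
theorem b_inv (p : Int) : ∀ n : Nat, 1 ≤ n → n ≤ 256 →
    (PySem.List.pyRange 1 (n : Int)).foldl (bstep p) [0]
      = (List.range n).map (fun k : Nat => crc8 p (k : Int)) := by
  intro n
  induction n with
  | zero => omega
  | succ n ih =>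
    intro _ hle
    by_cases hn : n = 0
    · subst hn
      rw [show ((1:Nat) : Int) = 1 from rfl, PySem.List.pyRange_one_eq_nil (by omega)]
      simp [crc8_zero]
    · have h1 : 1 ≤ n := by omega
      have hrec := ih h1 (by omega)
      have hcast : ((n + 1 : Nat) : Int) = (n : Int) + 1 := by push_cast; ring
      rw [hcast, PySem.List.pyRange_one_succ_right (by omega : (1:Int) ≤ (n : Int)),
        List.foldl_append, hrec, List.range_succ, List.map_append]
      simp only [List.foldl, List.map_cons, List.map_nil]
      unfold bstep
      by_cases hpow : PySem.Int.band (n : Int) ((n : Int) - 1) = 0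
      · rw [if_pos hpow]
      · rw [if_neg hpow]
        have hmem : (n : Int) ∈ PySem.List.pyRange 1 256 := by
          rw [PySem.List.mem_pyRange_one]; omega
        obtain ⟨ha0, ha1, hb0, hb1, hsum⟩ := split_facts (n : Int) hmem hpow
        rw [tbl_get p n _ ha0 ha1, tbl_get p n _ hb0 hb1, ← crc8_lin, hsum]

-- A's fold is the map of crc8 over 0..255
theorem a_eq (p : Int) :
    build_table_256 p = (List.range 256).map (fun k : Nat => crc8 p (k : Int)) := by
  unfold build_table_256
  rw [PySem.List.foldl_append_singleton_eq_map,
    show (256:Int) = ((256:Nat):Int) from by norm_num, PySem.List.pyRange_zero_nat,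
    List.map_map]
  rfl

theorem b_eq (p : Int) :
    build_table_256_alt p = (List.range 256).map (fun k : Nat => crc8 p (k : Int)) := by
  unfold build_table_256_alt
  have h : (256 : Int) = ((256 : Nat) : Int) := by norm_num
  rw [h, b_inv p 256 (by norm_num) (by norm_num)]

-- ===== VERDICT (by name: the statement is the Claim_ definition above) =====
theorem build_table_256_spec : Claim_equal_build_table_256 := by
  intro poly _
  unfold Spec_build_table_256
  rw [a_eq, b_eq]
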